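-- pv_equiv track=rewrite | github.com/sumit-haswar/py_prep | hash_tables/epi_hash_tables.py | get_nearest_repeated_entries
-- ===== SOURCE A (Python) =====
-- def get_nearest_repeated_entries(text: str):
--     result = {"start": -1, "end": -1}
--     diff = float('inf')
--     word_last_idx_map = {}
--     for idx, word in enumerate(text.split(" ")):
--         if word in word_last_idx_map:
--             last_idx = word_last_idx_map[word]
--             curr_diff = abs(last_idx - idx)
--             if curr_diff < diff:
--                 diff = curr_diff
--                 result['start'] = last_idx
--                 result['end'] = idx
--
--         word_last_idx_map[word] = idx
--
--     return result
-- ===== SOURCE B (Python) =====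
-- def get_nearest_repeated_entries(text: str):
--     words = text.split(" ")
--     start, end, diff = -1, -1, None
--     for j in range(len(words)):
--         # scan backwards for the nearest previous occurrence of words[j]
--         i = j - 1
--         while i >= 0:
--             if words[i] == words[j]:
--                 gap = j - i
--                 if diff is None or gap < diff:
--                     diff = gap
--                     start, end = i, j
--                 break
--             i -= 1
--     return {"start": start, "end": end}
-- ===== Notes on version B (the rewrite author's own statement) =====
-- stated objective: alternative
-- what changed: Replaces the word -> last-index hash map with a map-free backward scan: for each position it walks left to the nearest previous occurrence of the same word (breaking at the first match), keeping the minimal gap; no dictionary is maintained.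
import Mathlib
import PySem

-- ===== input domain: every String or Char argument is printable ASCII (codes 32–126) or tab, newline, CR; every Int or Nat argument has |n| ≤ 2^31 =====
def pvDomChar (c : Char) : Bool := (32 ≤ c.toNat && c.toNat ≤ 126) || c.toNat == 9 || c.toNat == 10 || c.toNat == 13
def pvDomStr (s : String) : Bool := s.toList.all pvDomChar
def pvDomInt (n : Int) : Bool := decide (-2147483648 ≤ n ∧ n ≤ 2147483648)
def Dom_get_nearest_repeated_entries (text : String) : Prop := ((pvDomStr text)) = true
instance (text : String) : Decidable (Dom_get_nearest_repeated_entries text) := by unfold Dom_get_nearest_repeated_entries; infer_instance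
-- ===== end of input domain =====

-- B replaces A's word->last-index hash map with a map-free backward scan to the nearest previous
-- occurrence of each word (alternative decomposition; not faster).


-- ===== PORT A =====
-- Python's float('inf') is modeled as `none : Option Int`: diff is infinite only before the
-- first update and is an int ever after (exact: curr_diff < inf is always true).
def pvStepA (s : (Int × Int × Option Int) × PySem.Dict String Int) (p : Int × String) :
    (Int × Int × Option Int) × PySem.Dict String Int :=
  let idx := p.1
  let word := p.2
  let s' :=
    match s.2.get? word with
    | some last =>
        let curr := |last - idx|
        match s.1.2.2 with
        | none => ((last, idx, some curr), s.2)
        | some d => if curr < d then ((last, idx, some curr), s.2) else s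
    | none => s
  (s'.1, s'.2.insert word idx)

def get_nearest_repeated_entries (text : String) : List (String × Int) :=
  let st := (PySem.List.enumerate ((PySem.Str.split? text " ").getD [])).foldl pvStepA
    ((-1, -1, none), PySem.Dict.empty)
  [("start", st.1.1), ("end", st.1.2.1)]

-- ===== PORT B =====
-- the 'while i >= 0: … break' backward scan of Source B: first i < j (scanning down) with words[i] == words[j]
def pvFindPrev (ws : List String) (w : String) : Nat → Option Nat
  | 0 => none
  | i+1 => if ws[i]? == some w then some i else pvFindPrev ws w i

def pvStepB (ws : List String) (s : Int × Int × Option Int) (j : Nat) : Int × Int × Option Int :=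
  match pvFindPrev ws (ws.getD j "") j with
  | none => s
  | some i =>
    let gap : Int := (j : Int) - (i : Int)
    match s.2.2 with
    | none => ((i : Int), (j : Int), some gap)
    | some d => if gap < d then ((i : Int), (j : Int), some gap) else s

def get_nearest_repeated_entries_alt (text : String) : List (String × Int) :=
  let ws := (PySem.Str.split? text " ").getD []
  let st := (List.range ws.length).foldl (pvStepB ws) (-1, -1, none)
  [("start", st.1), ("end", st.2.1)]

-- ===== PRECONDITION & SPEC =====
def Spec_get_nearest_repeated_entries (text : String) (out : List (String × Int)) : Prop := out = get_nearest_repeated_entries_alt text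
instance (text : String) (out : List (String × Int)) : Decidable (Spec_get_nearest_repeated_entries text out) := by unfold Spec_get_nearest_repeated_entries; infer_instance

-- ===== CLAIM (what is proved, stated in full; the proofs are below) =====
def Claim_equal_get_nearest_repeated_entries : Prop := ∀ (text : String), Dom_get_nearest_repeated_entries text → Spec_get_nearest_repeated_entries text (get_nearest_repeated_entries text)

-- ===== LEMMAS AND PROOFS =====

lemma pvEnum_eq_range (ws : List String) (s : Int) :
    PySem.List.enumerate ws s
      = (List.range ws.length).map (fun (i : Nat) => (s + (i : Int), ws.getD i "")) := by
  induction ws generalizing s with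
  | nil => simp [PySem.List.enumerate_nil]
  | cons x xs ih =>
      rw [PySem.List.enumerate_cons, ih (s + 1)]
      simp [List.range_succ_eq_map]
      intro a _
      omega

lemma pvFindPrev_lt (ws : List String) (w : String) :
    ∀ n i, pvFindPrev ws w n = some i → i < n := by
  intro n
  induction n with
  | zero => intro i h; simp [pvFindPrev] at h
  | succ k ih =>
      intro i h
      simp only [pvFindPrev] at h
      split at h
      · injection h with h; omega
      · exact Nat.lt_succ_of_lt (ih i h)

lemma pvMain (ws : List String) :
    ∀ n, n ≤ ws.length →
      (((List.range n).map (fun (i : Nat) => ((i : Int), ws.getD i ""))).foldl pvStepA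
          ((-1, -1, none), PySem.Dict.empty)).1
        = (List.range n).foldl (pvStepB ws) (-1, -1, none)
      ∧ ∀ w, (((List.range n).map (fun (i : Nat) => ((i : Int), ws.getD i ""))).foldl pvStepA
          ((-1, -1, none), PySem.Dict.empty)).2.get? w
          = (pvFindPrev ws w n).map (fun i => ((i : Int))) := by
  intro n
  induction n with
  | zero => simp [pvFindPrev]
  | succ k ih =>
      intro hk
      obtain ⟨ih1, ih2⟩ := ih (Nat.le_of_succ_le hk)
      have hklen : k < ws.length := hk
      have hget : ws[k]? = some (ws.getD k "") := by
        rw [List.getD_eq_getElem?_getD, List.getElem?_eq_getElem hklen]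
        simp
      rw [List.range_succ, List.map_append, List.foldl_append, List.foldl_append]
      simp only [List.map_cons, List.map_nil, List.foldl_cons, List.foldl_nil]
      set A := ((List.range k).map (fun (i : Nat) => ((i : Int), ws.getD i ""))).foldl pvStepA
        ((-1, -1, none), PySem.Dict.empty) with hA
      set B := (List.range k).foldl (pvStepB ws) ((-1 : Int), (-1 : Int), (none : Option Int)) with hB
      constructor
      · -- the (start, end, diff) triples agree after one more step
        show (pvStepA A ((k : Int), ws.getD k "")).1 = pvStepB ws B k
        rcases hp : pvFindPrev ws (ws.getD k "") k with _ | i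
        · have h0 : A.2.get? (ws.getD k "") = none := by rw [ih2, hp]; rfl
          simp only [pvStepA, pvStepB, hp, h0]
          exact ih1
        · have hi : i < k := pvFindPrev_lt ws _ k i hp
          have h1 : A.2.get? (ws.getD k "") = some (i : Int) := by rw [ih2, hp]; rfl
          have habs : |(i : Int) - (k : Int)| = (k : Int) - (i : Int) := by
            rw [abs_sub_comm]
            exact abs_of_nonneg (by omega)
          rcases hd : B.2.2 with _ | d
          · have hd' : A.1.2.2 = none := by rw [ih1, hd]
            simp only [pvStepA, pvStepB, hp, h1, habs, hd, hd']
          · have hd' : A.1.2.2 = some d := by rw [ih1, hd]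
            simp only [pvStepA, pvStepB, hp, h1, habs, hd, hd']
            by_cases hlt : (k : Int) - (i : Int) < d
            · simp [hlt]
            · simp [hlt, ih1]
      · -- the last-index map computes pvFindPrev
        intro w
        show (pvStepA A ((k : Int), ws.getD k "")).2.get? w
          = (pvFindPrev ws w (k + 1)).map (fun i => ((i : Int)))
        have hmap2 : (pvStepA A ((k : Int), ws.getD k "")).2
            = A.2.insert (ws.getD k "") (k : Int) := by
          simp only [pvStepA]
          rcases h1 : A.2.get? (ws.getD k "") with _ | last
          · rfl
          · rcases h2 : A.1.2.2 with _ | d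
            · rfl
            · by_cases hlt : |last - (k : Int)| < d <;> simp [hlt]
        have hfp : pvFindPrev ws w (k + 1)
            = if ws.getD k "" = w then some k else pvFindPrev ws w k := by
          simp only [pvFindPrev, hget]
          simp
        rw [hmap2, PySem.Dict.get?_insert, hfp]
        by_cases hw : w = ws.getD k ""
        · subst hw; simp
        · rw [if_neg hw, if_neg (fun h => hw h.symm), ih2]

-- ===== VERDICT (by name: the statement is the Claim_ definition above) =====
theorem get_nearest_repeated_entries_spec : Claim_equal_get_nearest_repeated_entries := by
  unfold Claim_equal_get_nearest_repeated_entries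
  intro text _
  unfold Spec_get_nearest_repeated_entries get_nearest_repeated_entries get_nearest_repeated_entries_alt
  have key : ∀ ws : List String,
      ((PySem.List.enumerate ws 0).foldl pvStepA ((-1, -1, none), PySem.Dict.empty)).1
        = (List.range ws.length).foldl (pvStepB ws) (-1, -1, none) := by
    intro ws
    rw [pvEnum_eq_range]
    have hmap : (List.range ws.length).map (fun (i : Nat) => ((0 : Int) + (i : Int), ws.getD i ""))
        = (List.range ws.length).map (fun (i : Nat) => ((i : Int), ws.getD i "")) := by
      apply List.map_congr_left
      intro i _
      simp
    rw [hmap]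
    exact (pvMain ws ws.length (le_refl _)).1
  show [("start", (((PySem.List.enumerate ((PySem.Str.split? text " ").getD []) 0).foldl pvStepA
      ((-1, -1, none), PySem.Dict.empty)).1).1),
    ("end", (((PySem.List.enumerate ((PySem.Str.split? text " ").getD []) 0).foldl pvStepA
      ((-1, -1, none), PySem.Dict.empty)).1).2.1)]
    = [("start", (((List.range ((PySem.Str.split? text " ").getD []).length).foldl
        (pvStepB ((PySem.Str.split? text " ").getD [])) (-1, -1, none))).1),
      ("end", (((List.range ((PySem.Str.split? text " ").getD []).length).foldl
        (pvStepB ((PySem.Str.split? text " ").getD [])) (-1, -1, none))).2.1)]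
  rw [key ((PySem.Str.split? text " ").getD [])]
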